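-- pv_equiv track=rewrite | github.com/petbccufscar/beecrowd | Python/Strings/1556.py | palavrasPossiveis
-- ===== SOURCE A (Python) =====
-- def removeRepetida(l):
--     return list(dict.fromkeys(l))
--
-- def palavrasPossiveis(n):
--
--     # Caso base onde não tem nada em n
--     if n == None or len(n) == 0:
--         return []
--
--     # A lista começa com a letra inicial da palavra dada
--     l = [n[0]]
--
--     # Ele calcula as palavras possiveis para o restante da palavra
--     recursao = palavrasPossiveis(n[1:])
--
--     # Dobra a lista com as palavras com e sem a letra inicial
--     for i in recursao:
--         # Adiciona a versão com e sem a letra inicial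
--         l.append(i)
--         l.append(n[0] + i)
--
--     # Remove as palavras repetidas da lista e retorna
--     return removeRepetida(l)
-- ===== SOURCE B (Python) =====
-- def palavrasPossiveis(n):
--     if n is None:
--         return []
--     cur = []
--     for c in reversed(n):
--         cur = list(dict.fromkeys([c] + [x for i in cur for x in (i, c + i)]))
--     return cur
-- ===== Notes on version B (the rewrite author's own statement) =====
-- stated objective: alternative
-- what changed: Replaces the suffix recursion (recursive call on n[1:], then an explicit append loop) by an iterative right-to-left fold over the characters that rebuilds the deduped list with a flat comprehension at each step.
import Mathlib
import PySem

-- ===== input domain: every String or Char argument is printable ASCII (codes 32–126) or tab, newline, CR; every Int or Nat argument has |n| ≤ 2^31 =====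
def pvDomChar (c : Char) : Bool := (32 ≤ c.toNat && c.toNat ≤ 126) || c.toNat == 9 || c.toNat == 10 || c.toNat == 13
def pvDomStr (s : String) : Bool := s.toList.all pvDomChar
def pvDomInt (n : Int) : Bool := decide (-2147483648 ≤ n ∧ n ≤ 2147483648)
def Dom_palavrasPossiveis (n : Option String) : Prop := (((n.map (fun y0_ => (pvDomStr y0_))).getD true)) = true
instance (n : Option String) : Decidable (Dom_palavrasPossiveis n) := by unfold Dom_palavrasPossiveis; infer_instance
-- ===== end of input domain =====

-- B replaces A's suffix recursion by an iterative right-to-left fold with a flat-map step (objective: alternative; return value only).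
-- ===== PORT A =====
-- recursion of A over the character list; strings are handled as char lists, String.ofList applied at the end
def pvRecA : List Char → List (List Char)
  | [] => []
  | c :: rest =>
      let recursao := pvRecA rest
      PySem.List.dedup (recursao.foldl (fun l i => l ++ [i, c :: i]) [[c]])

def palavrasPossiveis (n : Option String) : List String :=
  match n with
  | none => []
  | some s => (pvRecA s.toList).map (fun cs => String.ofList cs)

-- ===== PORT B =====
-- one step of B's loop: cur = dedup([c] + [x for i in cur for x in (i, c+i)])
def pvStepB (c : Char) (cur : List (List Char)) : List (List Char) :=
  PySem.List.dedup ([[c]] ++ cur.flatMap (fun i => [i, c :: i]))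

def palavrasPossiveis_alt (n : Option String) : List String :=
  match n with
  | none => []
  | some s => (s.toList.reverse.foldl (fun cur c => pvStepB c cur) []).map (fun cs => String.ofList cs)

-- ===== PRECONDITION & SPEC =====
def Spec_palavrasPossiveis (n : Option String) (out : List String) : Prop := out = palavrasPossiveis_alt n
instance (n : Option String) (out : List String) : Decidable (Spec_palavrasPossiveis n out) := by unfold Spec_palavrasPossiveis; infer_instance

-- ===== CLAIM (what is proved, stated in full; the proofs are below) =====
def Claim_equal_palavrasPossiveis : Prop := ∀ (n : Option String), Dom_palavrasPossiveis n → Spec_palavrasPossiveis n (palavrasPossiveis n)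

-- ===== LEMMAS AND PROOFS =====
theorem pvFold_eq_pvRecA (cs : List Char) :
    cs.foldr (fun c cur => pvStepB c cur) [] = pvRecA cs := by
  induction cs with
  | nil => rfl
  | cons c rest ih =>
      rw [List.foldr_cons, ih]
      simp only [pvRecA, pvStepB,
        PySem.List.foldl_append_eq_flatMap (g := fun i => [i, c :: i])]

-- ===== VERDICT (by name: the statement is the Claim_ definition above) =====
theorem palavrasPossiveis_spec : Claim_equal_palavrasPossiveis := by
  intro n _
  unfold Spec_palavrasPossiveis
  cases n with
  | none => rfl
  | some s => simp [palavrasPossiveis, palavrasPossiveis_alt, pvFold_eq_pvRecA]
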